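-- pv_equiv track=rewrite | github.com/c4g7-dev/lcxl3-linux-manager | test_mk3_leds.py | find_daw_port
-- ===== SOURCE A (Python) =====
-- def find_daw_port(names):
--     for n in names:
--         if "lcxl" in n.lower() and "daw" in n.lower():
--             return n
--     for n in names:
--         if "lcxl" in n.lower():
--             return n
--     return None
-- ===== SOURCE B (Python) =====
-- def find_daw_port(names):
--     fallback = None
--     for n in names:
--         low = n.lower()
--         if "lcxl" in low and "daw" in low:
--             return n
--         if "lcxl" in low and fallback is None:
--             fallback = n
--     return fallback
-- ===== Notes on version B (the rewrite author's own statement) =====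
-- stated objective: simpler
-- what changed: Replaces A's two separate scans over names with a single scan that returns immediately on a name containing both 'lcxl' and 'daw' and remembers the first plain-'lcxl' name as a fallback.
import Mathlib
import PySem

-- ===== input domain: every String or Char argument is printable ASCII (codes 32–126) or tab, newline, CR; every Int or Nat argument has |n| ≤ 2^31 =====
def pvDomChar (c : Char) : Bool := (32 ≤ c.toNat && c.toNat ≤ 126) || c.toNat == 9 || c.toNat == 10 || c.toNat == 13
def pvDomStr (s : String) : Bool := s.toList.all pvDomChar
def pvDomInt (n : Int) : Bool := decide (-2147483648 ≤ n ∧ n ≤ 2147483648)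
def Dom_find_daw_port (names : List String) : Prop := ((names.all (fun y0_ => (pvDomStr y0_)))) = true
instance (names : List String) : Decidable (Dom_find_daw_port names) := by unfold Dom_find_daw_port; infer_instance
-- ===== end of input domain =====

-- B replaces A's two passes over names with one pass that returns a 'lcxl'+'daw' match
-- immediately and keeps the first plain-'lcxl' name as a fallback (one pass instead of two).


-- ===== PORT A =====
-- first loop of A: first name whose lowercase contains both "lcxl" and "daw"
def pvFindBoth (names : List String) : Option String :=
  match names with
  | [] => none
  | n :: rest =>
    if PySem.Str.isIn "lcxl" (PySem.Str.lower n) && PySem.Str.isIn "daw" (PySem.Str.lower n)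
    then some n else pvFindBoth rest

-- second loop of A: first name whose lowercase contains "lcxl"
def pvFindLcxl (names : List String) : Option String :=
  match names with
  | [] => none
  | n :: rest =>
    if PySem.Str.isIn "lcxl" (PySem.Str.lower n) then some n else pvFindLcxl rest

def find_daw_port (names : List String) : Option String :=
  match pvFindBoth names with
  | some n => some n
  | none =>
    match pvFindLcxl names with
    | some n => some n
    | none => none

-- ===== PORT B =====
-- single pass with a fallback accumulator (B's loop)
def pvAltLoop (names : List String) (fallback : Option String) : Option String :=
  match names with
  | [] => fallback
  | n :: rest =>
    let low := PySem.Str.lower n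
    if PySem.Str.isIn "lcxl" low && PySem.Str.isIn "daw" low then some n
    else pvAltLoop rest
      (if PySem.Str.isIn "lcxl" low && fallback.isNone then some n else fallback)

def find_daw_port_alt (names : List String) : Option String :=
  pvAltLoop names none

-- ===== PRECONDITION & SPEC =====
def Spec_find_daw_port (names : List String) (out : Option String) : Prop := out = find_daw_port_alt names
instance (names : List String) (out : Option String) : Decidable (Spec_find_daw_port names out) := by unfold Spec_find_daw_port; infer_instance

-- ===== CLAIM (what is proved, stated in full; the proofs are below) =====
def Claim_equal_find_daw_port : Prop := ∀ (names : List String), Dom_find_daw_port names → Spec_find_daw_port names (find_daw_port names)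

-- ===== LEMMAS AND PROOFS =====
-- loop invariant: B's pass equals "first DAW match, else the saved fallback, else first lcxl match"
theorem pvAltLoop_eq (names : List String) (fb : Option String) :
    pvAltLoop names fb =
      match pvFindBoth names with
      | some n => some n
      | none => match fb with
                | some x => some x
                | none => pvFindLcxl names := by
  induction names generalizing fb with
  | nil => cases fb <;> simp [pvAltLoop, pvFindBoth, pvFindLcxl]
  | cons n rest ih =>
    simp only [pvAltLoop, pvFindBoth, pvFindLcxl]
    by_cases hl : PySem.Chars.isIn ['l','c','x','l'] (PySem.Chars.lower n.toList) = true
    · by_cases hd : PySem.Chars.isIn ['d','a','w'] (PySem.Chars.lower n.toList) = true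
      · simp [hl, hd]
      · cases fb <;> simp [hl, hd, ih]
    · cases fb <;> simp [hl, ih]

-- ===== VERDICT (by name: the statement is the Claim_ definition above) =====
theorem find_daw_port_spec : Claim_equal_find_daw_port := by
  intro names _
  unfold Spec_find_daw_port find_daw_port find_daw_port_alt
  rw [pvAltLoop_eq]
  cases pvFindBoth names <;> cases pvFindLcxl names <;> rfl
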